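-- pv_equiv track=rewrite | github.com/Arsen1302/Code-copy-detector | TestData/solutions/problem_1005_4.py | solution_1005_4
-- ===== SOURCE A (Python) =====
-- def solution_1005_4(path: str) -> bool:
--     coor = [0, 0]
--     coors = [[0, 0]]
--     for i in path:
--         if i == 'N': coor[1] += 1
--         elif i == 'E': coor[0] += 1
--         elif i == 'S': coor[1] -= 1
--         else: coor[0] -= 1
--         if coor in coors: return True
--         coors.append(coor[:])
--     return False
-- ===== SOURCE B (Python) =====
-- def solution_1005_4(path: str) -> bool:
--     x = y = 0
--     pts = [(0, 0)]
--     for c in path: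
--         if c == 'N': y += 1
--         elif c == 'E': x += 1
--         elif c == 'S': y -= 1
--         else: x -= 1
--         pts.append((x, y))
--     return len(set(pts)) != len(pts)
-- ===== Notes on version B (the rewrite author's own statement) =====
-- stated objective: faster
-- what changed: A tests membership of the current cell in the growing visited list at every step and early-returns on the first repeat; B just collects all visited coordinates in one pass and decides the result afterwards with a single hash-set duplicate check len(set(pts)) != len(pts), removing the in-loop linear membership scan and early exit.
import Mathlib
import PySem

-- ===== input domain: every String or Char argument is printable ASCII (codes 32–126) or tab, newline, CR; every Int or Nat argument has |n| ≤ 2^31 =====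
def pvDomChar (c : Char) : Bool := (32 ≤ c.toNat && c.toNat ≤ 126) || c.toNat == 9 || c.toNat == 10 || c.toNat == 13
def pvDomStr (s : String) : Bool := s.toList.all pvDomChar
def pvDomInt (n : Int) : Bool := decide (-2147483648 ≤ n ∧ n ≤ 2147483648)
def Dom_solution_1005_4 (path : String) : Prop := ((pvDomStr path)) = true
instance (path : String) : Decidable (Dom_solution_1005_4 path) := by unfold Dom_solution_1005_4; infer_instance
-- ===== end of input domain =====

-- B replaces A's per-step membership test and early return by collecting all visited
-- coordinates and one final duplicate check (len(set(pts)) != len(pts)).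

-- ===== PORT A =====
-- one step of A: update the coordinate by the character (else-branch = x-1)
def pvStep (p : Int × Int) (c : Char) : Int × Int :=
  if c = 'N' then (p.1, p.2 + 1)
  else if c = 'E' then (p.1 + 1, p.2)
  else if c = 'S' then (p.1, p.2 - 1)
  else (p.1 - 1, p.2)

-- A's loop: coor is the current cell, coors the list of visited cells; early return True on a repeat
def pvALoop (cs : List Char) (coor : Int × Int) (coors : List (Int × Int)) : Bool :=
  match cs with
  | [] => false
  | c :: rest =>
    let coor' := pvStep coor c
    if coor' ∈ coors then true
    else pvALoop rest coor' (coors ++ [coor'])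

def solution_1005_4 (path : String) : Bool :=
  pvALoop path.toList (0, 0) [(0, 0)]

-- ===== PORT B =====
-- B's loop: collect every visited coordinate (the appends of Source B's for-loop)
def pvBPts (cs : List Char) (p : Int × Int) : List (Int × Int) :=
  match cs with
  | [] => []
  | c :: rest =>
    let p' := pvStep p c
    p' :: pvBPts rest p'

def solution_1005_4_alt (path : String) : Bool :=
  let pts := (0, 0) :: pvBPts path.toList (0, 0)
  decide ((PySem.Set.ofList pts).length ≠ pts.length)

-- ===== PRECONDITION & SPEC =====
def Spec_solution_1005_4 (path : String) (out : Bool) : Prop := out = solution_1005_4_alt path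
instance (path : String) (out : Bool) : Decidable (Spec_solution_1005_4 path out) := by unfold Spec_solution_1005_4; infer_instance

-- ===== CLAIM (what is proved, stated in full; the proofs are below) =====
def Claim_equal_solution_1005_4 : Prop := ∀ (path : String), Dom_solution_1005_4 path → Spec_solution_1005_4 path (solution_1005_4 path)

-- ===== LEMMAS AND PROOFS =====

-- set(xs) has as many elements as xs exactly when xs has no duplicates
theorem pv_ofList_length_eq_iff {α : Type} [BEq α] [LawfulBEq α] (xs : List α) :
    (PySem.Set.ofList xs).length = xs.length ↔ xs.Nodup := by
  induction xs using List.reverseRecOn with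
  | nil => simp [PySem.Set.ofList]
  | append_singleton xs x ih =>
    rw [PySem.Set.ofList_append_singleton]
    by_cases hx : x ∈ xs
    · have hmem : x ∈ PySem.Set.ofList xs := by rw [PySem.Set.mem_ofList]; exact hx
      have hadd : PySem.Set.add (PySem.Set.ofList xs) x = PySem.Set.ofList xs := by
        simp [PySem.Set.add, PySem.Set.contains, hmem]
      rw [hadd]
      have hle := PySem.Set.length_ofList_le (xs := xs)
      constructor
      · intro hl; simp [List.length_append] at hl; omega
      · intro hn; exact absurd hx ((List.nodup_append.mp hn).2.2 x hx x List.mem_cons_self rfl).elim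
    · have hmem : x ∉ PySem.Set.ofList xs := by rw [PySem.Set.mem_ofList]; exact hx
      have hadd : PySem.Set.add (PySem.Set.ofList xs) x = PySem.Set.ofList xs ++ [x] := by
        simp [PySem.Set.add, PySem.Set.contains, hmem]
      rw [hadd]
      simp only [List.length_append, List.length_singleton]
      rw [List.nodup_append]
      constructor
      · intro hl
        refine ⟨ih.mp (by omega), List.nodup_singleton _, ?_⟩
        intro a ha b hb
        rw [List.mem_singleton] at hb
        subst hb
        exact fun e => hx (e ▸ ha)
      · intro ⟨hn, _, _⟩
        rw [ih.mpr hn]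

-- A's loop returns true iff appending the remaining positions to the visited list creates a duplicate
theorem pvALoop_eq (cs : List Char) (p : Int × Int) (coors : List (Int × Int))
    (h : coors.Nodup) :
    pvALoop cs p coors = decide (¬ (coors ++ pvBPts cs p).Nodup) := by
  induction cs generalizing p coors with
  | nil => simp [pvALoop, pvBPts, h]
  | cons c rest ih =>
    simp only [pvALoop, pvBPts]
    by_cases hm : pvStep p c ∈ coors
    · rw [if_pos hm]
      have : ¬ (coors ++ pvStep p c :: pvBPts rest (pvStep p c)).Nodup := by
        intro hn
        have := (List.nodup_append.mp hn).2.2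
        exact this (pvStep p c) hm (pvStep p c) List.mem_cons_self rfl
      exact (decide_eq_true this).symm
    · have h' : (coors ++ [pvStep p c]).Nodup := by
        rw [List.nodup_append]
        refine ⟨h, List.nodup_singleton _, ?_⟩
        intro a ha b hb
        rw [List.mem_singleton] at hb
        subst hb
        exact fun e => hm (e ▸ ha)
      rw [if_neg hm, ih (pvStep p c) (coors ++ [pvStep p c]) h', List.append_assoc]
      rfl

-- ===== VERDICT (by name: the statement is the Claim_ definition above) =====
theorem solution_1005_4_spec : Claim_equal_solution_1005_4 := by
  intro path _
  unfold Spec_solution_1005_4 solution_1005_4 solution_1005_4_alt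
  rw [pvALoop_eq _ _ _ (by simp)]
  rw [decide_eq_decide]
  rw [not_iff_not]
  constructor
  · intro hn; exact (pv_ofList_length_eq_iff _).mpr (by simpa using hn)
  · intro hl; simpa using (pv_ofList_length_eq_iff _).mp hl
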